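-- pv_equiv track=rewrite | github.com/Gautzilla/AdventOfCode | python_AoC/2024/08/2024_08.py | resonant_antinodes_coordinates
-- ===== SOURCE A (Python) =====
-- def resonant_antinodes_coordinates(
--     antenna1: tuple[int, int], antenna2: tuple[int, int], grid_size: tuple[int, int]
-- ) -> list[tuple[int, int]]:
--     antinodes = [antenna1, antenna2]
--
--     for a1, a2 in [(antenna1, antenna2), (antenna2, antenna1)]:
--         xdiff = a1[0] - a2[0]
--         ydiff = a1[1] - a2[1]
--         antinode = a1
--
--         while True:
--             antinode = (antinode[0] + xdiff, antinode[1] + ydiff)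
--             if not is_in_grid(antinode, grid_size):
--                 break
--             antinodes.append(antinode)
--
--     return antinodes
--
-- def is_in_grid(antinode: tuple[int, int], grid_size: tuple[int, int]) -> bool:
--     return 0 <= antinode[0] < grid_size[0] and 0 <= antinode[1] < grid_size[1]
-- ===== SOURCE B (Python) =====
-- def resonant_antinodes_coordinates(antenna1, antenna2, grid_size):
--     dx = antenna1[0] - antenna2[0]
--     dy = antenna1[1] - antenna2[1]
--     return ([antenna1, antenna2]
--             + _ray(antenna1, (dx, dy), grid_size)
--             + _ray(antenna2, (-dx, -dy), grid_size))
--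
--
-- def _ray(start, step, grid_size):
--     """Points start+k*step for k=1..kmax, where kmax is computed in closed form."""
--     first = (start[0] + step[0], start[1] + step[1])
--     if not (0 <= first[0] < grid_size[0] and 0 <= first[1] < grid_size[1]):
--         return []
--     kmax = None
--     for s, st, g in ((step[0], start[0], grid_size[0]), (step[1], start[1], grid_size[1])):
--         if s > 0:
--             b = (g - 1 - st) // s
--         elif s < 0:
--             b = st // (-s)
--         else:
--             continue
--         kmax = b if kmax is None else min(kmax, b)
--     if kmax is None:  # step == (0,0): no finite bound (A never returns here)
--         return []
--     return [(start[0] + k * step[0], start[1] + k * step[1]) for k in range(1, kmax + 1)]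
-- ===== Notes on version B (the rewrite author's own statement) =====
-- stated objective: alternative
-- what changed: Replaces A's step-by-step while-loops (one in-grid test per step) with a closed-form computation of kmax per ray via floor division on each axis, then a single range comprehension generating the points; Pre_ excludes antenna1==antenna2 with the antenna inside the grid, where A loops forever.
import Mathlib
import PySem

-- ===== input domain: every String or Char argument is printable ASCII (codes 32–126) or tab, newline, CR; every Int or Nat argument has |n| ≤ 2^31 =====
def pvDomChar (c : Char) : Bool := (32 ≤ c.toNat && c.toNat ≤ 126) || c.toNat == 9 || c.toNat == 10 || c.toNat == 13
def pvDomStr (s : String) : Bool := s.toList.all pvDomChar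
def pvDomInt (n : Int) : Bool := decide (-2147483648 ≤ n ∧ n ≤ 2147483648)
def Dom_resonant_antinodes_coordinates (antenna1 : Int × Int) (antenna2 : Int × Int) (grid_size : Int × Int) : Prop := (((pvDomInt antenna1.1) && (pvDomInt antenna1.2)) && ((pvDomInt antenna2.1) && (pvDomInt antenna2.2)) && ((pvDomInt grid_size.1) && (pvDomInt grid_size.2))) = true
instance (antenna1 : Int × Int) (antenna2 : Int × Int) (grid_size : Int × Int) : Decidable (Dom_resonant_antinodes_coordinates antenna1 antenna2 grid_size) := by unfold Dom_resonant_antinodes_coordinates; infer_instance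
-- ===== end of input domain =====

-- B computes each ray's length in closed form (floor division per axis) instead of A's
-- step-by-step while-loop; equivalence is on Pre_, which excludes the inputs where A loops forever.

-- ===== PORT A =====
-- is_in_grid helper of A (also used, inline, by Source B's bounds check)
def pvInGrid (p : Int × Int) (g : Int × Int) : Bool :=
  decide (0 ≤ p.1 ∧ p.1 < g.1 ∧ 0 ≤ p.2 ∧ p.2 < g.2)

-- A's 'while True' loop, fueled; pvFuel is enough fuel on every input of Pre_ (proved below),
-- so the port is faithful wherever A terminates.
def pvLoopA (g d : Int × Int) : Nat → (Int × Int) → List (Int × Int) → List (Int × Int)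
  | 0, _, acc => acc
  | n+1, p, acc =>
    let q := (p.1 + d.1, p.2 + d.2)
    if pvInGrid q g then pvLoopA g d n q (acc ++ [q]) else acc

def pvFuel (g : Int × Int) : Nat := g.1.toNat + g.2.toNat + 1

def resonant_antinodes_coordinates (antenna1 : Int × Int) (antenna2 : Int × Int) (grid_size : Int × Int) : List (Int × Int) :=
  let acc1 := pvLoopA grid_size (antenna1.1 - antenna2.1, antenna1.2 - antenna2.2)
      (pvFuel grid_size) antenna1 [antenna1, antenna2]
  pvLoopA grid_size (antenna2.1 - antenna1.1, antenna2.2 - antenna1.2)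
      (pvFuel grid_size) antenna2 acc1

-- ===== PORT B =====
-- per-axis step bound of Source B's loop body (None = axis skipped, step component 0)
def pvAxisBound (s st g : Int) : Option Int :=
  if 0 < s then some (PySem.Int.floordiv (g - 1 - st) s)
  else if s < 0 then some (PySem.Int.floordiv st (-s))
  else none

def pvRay (start step g : Int × Int) : List (Int × Int) :=
  let first := (start.1 + step.1, start.2 + step.2)
  if pvInGrid first g then
    match pvAxisBound step.1 start.1 g.1, pvAxisBound step.2 start.2 g.2 with
    | none, none => []
    | some b, none =>
        (PySem.List.pyRange 1 (b + 1) 1).map (fun k => (start.1 + k * step.1, start.2 + k * step.2))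
    | none, some b =>
        (PySem.List.pyRange 1 (b + 1) 1).map (fun k => (start.1 + k * step.1, start.2 + k * step.2))
    | some b1, some b2 =>
        (PySem.List.pyRange 1 (min b1 b2 + 1) 1).map (fun k => (start.1 + k * step.1, start.2 + k * step.2))
  else []

def resonant_antinodes_coordinates_alt (antenna1 : Int × Int) (antenna2 : Int × Int) (grid_size : Int × Int) : List (Int × Int) :=
  let dx := antenna1.1 - antenna2.1
  let dy := antenna1.2 - antenna2.2
  [antenna1, antenna2] ++ pvRay antenna1 (dx, dy) grid_size ++ pvRay antenna2 (-dx, -dy) grid_size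

-- ===== PRECONDITION & SPEC =====
-- Pre_ excludes exactly the inputs on which A never returns: antenna1 == antenna2 with the
-- antenna inside the grid makes A's while-loop spin forever on the same point.
def Pre_resonant_antinodes_coordinates (antenna1 : Int × Int) (antenna2 : Int × Int) (grid_size : Int × Int) : Prop :=
  antenna1 ≠ antenna2 ∨
  ¬ (0 ≤ antenna1.1 ∧ antenna1.1 < grid_size.1 ∧ 0 ≤ antenna1.2 ∧ antenna1.2 < grid_size.2)

instance (antenna1 : Int × Int) (antenna2 : Int × Int) (grid_size : Int × Int) : Decidable (Pre_resonant_antinodes_coordinates antenna1 antenna2 grid_size) := by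
  unfold Pre_resonant_antinodes_coordinates; infer_instance

def pvWitness_resonant_antinodes_coordinates : (Int × Int) × (Int × Int) × (Int × Int) :=
  ((0, 0), (1, 1), (10, 10))

def Spec_resonant_antinodes_coordinates (antenna1 : Int × Int) (antenna2 : Int × Int) (grid_size : Int × Int) (out : List (Int × Int)) : Prop := out = resonant_antinodes_coordinates_alt antenna1 antenna2 grid_size
instance (antenna1 : Int × Int) (antenna2 : Int × Int) (grid_size : Int × Int) (out : List (Int × Int)) : Decidable (Spec_resonant_antinodes_coordinates antenna1 antenna2 grid_size out) := by unfold Spec_resonant_antinodes_coordinates; infer_instance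

-- ===== CLAIM (what is proved, stated in full; the proofs are below) =====
def Claim_equal_resonant_antinodes_coordinates : Prop := ∀ (antenna1 : Int × Int) (antenna2 : Int × Int) (grid_size : Int × Int), Dom_resonant_antinodes_coordinates antenna1 antenna2 grid_size → Pre_resonant_antinodes_coordinates antenna1 antenna2 grid_size → Spec_resonant_antinodes_coordinates antenna1 antenna2 grid_size (resonant_antinodes_coordinates antenna1 antenna2 grid_size)

-- ===== LEMMAS AND PROOFS =====

-- if the first step lands in the grid, every defined axis bound is at least 1
theorem pv_axis_b_pos (s st g b : Int) (h0 : 0 ≤ st + s) (h1 : st + s < g)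
    (hb : pvAxisBound s st g = some b) : 1 ≤ b := by
  unfold pvAxisBound at hb
  split_ifs at hb with hs hs'
  · cases hb
    exact (PySem.Int.le_floordiv_iff_mul_le hs).mpr (by linarith)
  · cases hb
    exact (PySem.Int.le_floordiv_iff_mul_le (by linarith)).mpr (by linarith)

-- every defined axis bound is at most g
theorem pv_axis_b_le (s st g b : Int) (h0 : 0 ≤ st + s) (h1 : st + s < g)
    (hb : pvAxisBound s st g = some b) : b ≤ g := by
  have hb1 : 1 ≤ b := pv_axis_b_pos s st g b h0 h1 hb
  unfold pvAxisBound at hb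
  split_ifs at hb with hs hs'
  · cases hb
    have hbs : PySem.Int.floordiv (g - 1 - st) s * s ≤ g - 1 - st := (PySem.Int.le_floordiv_iff_mul_le hs).mp le_rfl
    set b := PySem.Int.floordiv (g - 1 - st) s with hbdef
    nlinarith [mul_nonneg (by linarith : (0:Int) ≤ b - 1) (by linarith : (0:Int) ≤ s - 1)]
  · cases hb
    have hbs : PySem.Int.floordiv st (-s) * (-s) ≤ st := (PySem.Int.le_floordiv_iff_mul_le (by linarith)).mp le_rfl
    set b := PySem.Int.floordiv st (-s) with hbdef
    nlinarith [mul_nonneg (by linarith : (0:Int) ≤ b - 1) (by linarith : (0:Int) ≤ -s - 1)]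

-- within the bound, the axis stays in range
theorem pv_axis_ok (s st g b i : Int) (h0 : 0 ≤ st + s) (h1 : st + s < g)
    (hb : pvAxisBound s st g = some b) (hi1 : 1 ≤ i) (hib : i ≤ b) :
    0 ≤ st + i * s ∧ st + i * s < g := by
  unfold pvAxisBound at hb
  split_ifs at hb with hs hs'
  · cases hb
    have hup : i * s ≤ (PySem.Int.floordiv (g - 1 - st) s) * s :=
      mul_le_mul_of_nonneg_right hib (le_of_lt hs)
    have hfd : (PySem.Int.floordiv (g - 1 - st) s) * s ≤ g - 1 - st :=
      (PySem.Int.le_floordiv_iff_mul_le hs).mp le_rfl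
    have hlo : 1 * s ≤ i * s := mul_le_mul_of_nonneg_right hi1 (le_of_lt hs)
    constructor <;> linarith
  · cases hb
    have hup : i * (-s) ≤ (PySem.Int.floordiv st (-s)) * (-s) :=
      mul_le_mul_of_nonneg_right hib (by linarith)
    have hfd : (PySem.Int.floordiv st (-s)) * (-s) ≤ st :=
      (PySem.Int.le_floordiv_iff_mul_le (by linarith)).mp le_rfl
    have hlo : 1 * (-s) ≤ i * (-s) := mul_le_mul_of_nonneg_right hi1 (by linarith)
    constructor <;> nlinarith

-- a skipped axis (step 0) stays in range forever
theorem pv_axis_none (s st g i : Int) (h0 : 0 ≤ st + s) (h1 : st + s < g)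
    (hb : pvAxisBound s st g = none) : 0 ≤ st + i * s ∧ st + i * s < g := by
  unfold pvAxisBound at hb
  have hs : s = 0 := by
    by_contra h
    rcases lt_or_gt_of_ne h with h' | h'
    · simp only [if_neg (by omega : ¬ (0:Int) < s), if_pos h'] at hb
      exact absurd hb (by simp)
    · simp only [if_pos h'] at hb
      exact absurd hb (by simp)
  subst hs
  simp only [mul_zero]
  omega

-- one past the bound, the axis leaves the range
theorem pv_axis_out (s st g b : Int) (hb : pvAxisBound s st g = some b) :
    ¬ (0 ≤ st + (b + 1) * s ∧ st + (b + 1) * s < g) := by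
  unfold pvAxisBound at hb
  split_ifs at hb with hs hs'
  · cases hb
    have hlt : PySem.Int.floordiv (g - 1 - st) s < PySem.Int.floordiv (g - 1 - st) s + 1 := by omega
    have hx := (PySem.Int.floordiv_lt_iff_lt_mul hs).mp hlt
    rintro ⟨hA, hB⟩; linarith
  · cases hb
    have hlt : PySem.Int.floordiv st (-s) < PySem.Int.floordiv st (-s) + 1 := by omega
    have hx := (PySem.Int.floordiv_lt_iff_lt_mul (by linarith : (0:Int) < -s)).mp hlt
    have hr : (PySem.Int.floordiv st (-s) + 1) * (-s) = -((PySem.Int.floordiv st (-s) + 1) * s) := by ring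
    rintro ⟨hA, hB⟩; linarith [hr ▸ hx]

-- A's loop, given enough fuel, emits exactly the first m multiples past the start
theorem pv_loop_eq (g d : Int × Int) (m : Nat) : ∀ (fuel : Nat) (p : Int × Int) (acc : List (Int × Int)),
    m < fuel →
    (∀ i : Int, 1 ≤ i → i ≤ (m : Int) → pvInGrid (p.1 + i * d.1, p.2 + i * d.2) g = true) →
    pvInGrid (p.1 + ((m : Int) + 1) * d.1, p.2 + ((m : Int) + 1) * d.2) g = false →
    pvLoopA g d fuel p acc
      = acc ++ (PySem.List.pyRange 1 ((m : Int) + 1) 1).map (fun k => (p.1 + k * d.1, p.2 + k * d.2)) := by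
  induction m with
  | zero =>
    intro fuel p acc hf hin hout
    obtain ⟨f, rfl⟩ : ∃ f, fuel = f + 1 := ⟨fuel - 1, by omega⟩
    have hout' : pvInGrid (p.1 + d.1, p.2 + d.2) g = false := by
      simpa using hout
    simp only [pvLoopA, hout']
    rw [PySem.List.pyRange_one_eq_nil (by simp)]
    simp
  | succ n ih =>
    intro fuel p acc hf hin hout
    obtain ⟨f, rfl⟩ : ∃ f, fuel = f + 1 := ⟨fuel - 1, by omega⟩
    have h1 : pvInGrid (p.1 + d.1, p.2 + d.2) g = true := by
      have := hin 1 le_rfl (by push_cast; omega)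
      simpa using this
    simp only [pvLoopA, h1, if_true]
    rw [ih f (p.1 + d.1, p.2 + d.2) (acc ++ [(p.1 + d.1, p.2 + d.2)]) (by omega)
      (fun i hi1 hin' => by
        have := hin (i + 1) (by omega) (by push_cast; omega)
        simp only []
        convert this using 3 <;> ring)
      (by
        have heq : (p.1 + d.1 + ((n : Int) + 1) * d.1, p.2 + d.2 + ((n : Int) + 1) * d.2)
            = (p.1 + (((n + 1 : Nat) : Int) + 1) * d.1, p.2 + (((n + 1 : Nat) : Int) + 1) * d.2) := by
          simp only [Prod.mk.injEq]; push_cast; constructor <;> ring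
        rw [heq]; exact hout)]
    rw [PySem.List.pyRange_one, PySem.List.pyRange_one]
    have e1 : (((n : Int) + 1) - 1).toNat = n := by omega
    have e2 : (((((n : Nat) + 1 : Nat) : Int) + 1) - 1).toNat = n + 1 := by push_cast; omega
    rw [e1, e2, List.range_succ_eq_map]
    simp only [List.map_cons, List.map_map, List.append_assoc, List.cons_append, Nat.cast_zero, add_zero, one_mul]
    congr 1
    congr 1
    apply List.map_congr_left
    intro k _
    simp only [Function.comp_apply, Nat.cast_succ, Prod.mk.injEq]
    constructor <;> ring

-- a skipped axis means that step component is 0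
theorem pv_axis_none_imp (s st g : Int) (hb : pvAxisBound s st g = none) : s = 0 := by
  by_contra h
  rcases lt_or_gt_of_ne h with h' | h'
  · simp only [pvAxisBound, if_neg (by omega : ¬ (0:Int) < s), if_pos h'] at hb
    exact absurd hb (by simp)
  · simp only [pvAxisBound, if_pos h'] at hb
    exact absurd hb (by simp)

-- the loop lemma, instantiated at an Int bound kmax ≥ 1
theorem pv_ray_core (g d p : Int × Int) (acc : List (Int × Int)) (kmax : Int)
    (h1k : 1 ≤ kmax) (hfuel : kmax.toNat < pvFuel g)
    (hin : ∀ i : Int, 1 ≤ i → i ≤ kmax → pvInGrid (p.1 + i * d.1, p.2 + i * d.2) g = true)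
    (hout : pvInGrid (p.1 + (kmax + 1) * d.1, p.2 + (kmax + 1) * d.2) g = false) :
    pvLoopA g d (pvFuel g) p acc
      = acc ++ (PySem.List.pyRange 1 (kmax + 1) 1).map (fun k => (p.1 + k * d.1, p.2 + k * d.2)) := by
  have hm : ((kmax.toNat : Nat) : Int) = kmax := by omega
  rw [← hm]
  exact pv_loop_eq g d kmax.toNat (pvFuel g) p acc hfuel
    (fun i hi1 hik => hin i hi1 (by omega))
    (by rw [hm]; exact hout)

-- pvInGrid as a Prop
theorem pv_inGrid_true (q g : Int × Int) :
    pvInGrid q g = true ↔ (0 ≤ q.1 ∧ q.1 < g.1 ∧ 0 ≤ q.2 ∧ q.2 < g.2) := by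
  unfold pvInGrid; exact decide_eq_true_iff

theorem pv_inGrid_false (q g : Int × Int) :
    pvInGrid q g = false ↔ ¬ (0 ≤ q.1 ∧ q.1 < g.1 ∧ 0 ≤ q.2 ∧ q.2 < g.2) := by
  unfold pvInGrid; exact decide_eq_false_iff_not

-- each ray of A equals B's closed-form ray
theorem pv_ray_eq (g d p : Int × Int) (acc : List (Int × Int))
    (h : d ≠ (0, 0) ∨ pvInGrid (p.1 + d.1, p.2 + d.2) g = false) :
    pvLoopA g d (pvFuel g) p acc = acc ++ pvRay p d g := by
  by_cases hfirst : pvInGrid (p.1 + d.1, p.2 + d.2) g = true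
  · have hd : d ≠ (0, 0) := by
      rcases h with h | h
      · exact h
      · rw [hfirst] at h; exact absurd h (by simp)
    obtain ⟨hx0, hx1, hy0, hy1⟩ := (pv_inGrid_true _ _).mp hfirst
    have hg1 : 1 ≤ g.1 := by omega
    have hg2 : 1 ≤ g.2 := by omega
    unfold pvRay
    rw [if_pos hfirst]
    rcases hb1 : pvAxisBound d.1 p.1 g.1 with _ | b1 <;>
      rcases hb2 : pvAxisBound d.2 p.2 g.2 with _ | b2
    · exact absurd (Prod.ext (pv_axis_none_imp _ _ _ hb1) (pv_axis_none_imp _ _ _ hb2)) hd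
    · -- only the y axis bounds
      apply pv_ray_core
      · exact pv_axis_b_pos _ _ _ _ hy0 hy1 hb2
      · have := pv_axis_b_le _ _ _ _ hy0 hy1 hb2
        unfold pvFuel; omega
      · intro i hi1 hik
        rw [pv_inGrid_true]
        obtain ⟨ha, hb⟩ := pv_axis_none d.1 p.1 g.1 i hx0 hx1 hb1
        obtain ⟨hc, hd'⟩ := pv_axis_ok d.2 p.2 g.2 b2 i hy0 hy1 hb2 hi1 hik
        exact ⟨ha, hb, hc, hd'⟩
      · rw [pv_inGrid_false]
        rintro ⟨-, -, hc, hd'⟩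
        exact pv_axis_out d.2 p.2 g.2 b2 hb2 ⟨hc, hd'⟩
    · -- only the x axis bounds
      apply pv_ray_core
      · exact pv_axis_b_pos _ _ _ _ hx0 hx1 hb1
      · have := pv_axis_b_le _ _ _ _ hx0 hx1 hb1
        unfold pvFuel; omega
      · intro i hi1 hik
        rw [pv_inGrid_true]
        obtain ⟨ha, hb⟩ := pv_axis_ok d.1 p.1 g.1 b1 i hx0 hx1 hb1 hi1 hik
        obtain ⟨hc, hd'⟩ := pv_axis_none d.2 p.2 g.2 i hy0 hy1 hb2
        exact ⟨ha, hb, hc, hd'⟩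
      · rw [pv_inGrid_false]
        rintro ⟨ha, hb, -, -⟩
        exact pv_axis_out d.1 p.1 g.1 b1 hb1 ⟨ha, hb⟩
    · -- both axes bound; kmax = min b1 b2
      apply pv_ray_core
      · exact le_min (pv_axis_b_pos _ _ _ _ hx0 hx1 hb1) (pv_axis_b_pos _ _ _ _ hy0 hy1 hb2)
      · have h1 := pv_axis_b_le _ _ _ _ hx0 hx1 hb1
        have hm : min b1 b2 ≤ b1 := min_le_left _ _
        unfold pvFuel; omega
      · intro i hi1 hik
        rw [pv_inGrid_true]
        obtain ⟨ha, hb⟩ := pv_axis_ok d.1 p.1 g.1 b1 i hx0 hx1 hb1 hi1 (le_trans hik (min_le_left _ _))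
        obtain ⟨hc, hd'⟩ := pv_axis_ok d.2 p.2 g.2 b2 i hy0 hy1 hb2 hi1 (le_trans hik (min_le_right _ _))
        exact ⟨ha, hb, hc, hd'⟩
      · rw [pv_inGrid_false]
        rcases min_cases b1 b2 with ⟨hmin, -⟩ | ⟨hmin, -⟩ <;> rw [hmin]
        · rintro ⟨ha, hb, -, -⟩
          exact pv_axis_out d.1 p.1 g.1 b1 hb1 ⟨ha, hb⟩
        · rintro ⟨-, -, hc, hd'⟩
          exact pv_axis_out d.2 p.2 g.2 b2 hb2 ⟨hc, hd'⟩
  · have hfalse : pvInGrid (p.1 + d.1, p.2 + d.2) g = false := by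
      revert hfirst; cases pvInGrid (p.1 + d.1, p.2 + d.2) g <;> simp
    unfold pvRay
    rw [if_neg (by rw [hfalse]; simp)]
    unfold pvFuel
    simp only [pvLoopA, hfalse]
    simp

-- ===== VERDICT (by name: the statement is the Claim_ definition above) =====
theorem resonant_antinodes_coordinates_spec : Claim_equal_resonant_antinodes_coordinates := by
  intro a1 a2 g _ hpre
  unfold Spec_resonant_antinodes_coordinates
  unfold resonant_antinodes_coordinates resonant_antinodes_coordinates_alt
  simp only []
  rcases eq_or_ne a1 a2 with heq | hne
  · -- antennas equal: Pre_ says a1 is out of the grid, both rays break at once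
    have hout : ¬ (0 ≤ a1.1 ∧ a1.1 < g.1 ∧ 0 ≤ a1.2 ∧ a1.2 < g.2) := by
      rcases hpre with h | h
      · exact absurd heq h
      · exact h
    subst heq
    have hz : a1.1 - a1.1 = 0 := by ring
    rw [pv_ray_eq g (a1.1 - a1.1, a1.2 - a1.2) a1 _ (Or.inr (by
      rw [pv_inGrid_false]; simp only [hz, sub_self, add_zero]; exact hout))]
    rw [pv_ray_eq g (a1.1 - a1.1, a1.2 - a1.2) a1 _ (Or.inr (by
      rw [pv_inGrid_false]; simp only [hz, sub_self, add_zero]; exact hout))]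
    have hneg : (-(a1.1 - a1.1), -(a1.2 - a1.2)) = (a1.1 - a1.1, a1.2 - a1.2) := by
      simp only [Prod.mk.injEq]; constructor <;> ring
    rw [hneg, List.append_assoc]
  · -- antennas distinct: both direction vectors are nonzero
    have hd1 : (a1.1 - a2.1, a1.2 - a2.2) ≠ ((0 : Int), (0 : Int)) := by
      intro hc
      apply hne
      have h1 := congrArg Prod.fst hc
      have h2 := congrArg Prod.snd hc
      simp only [] at h1 h2
      exact Prod.ext (by omega) (by omega)
    have hd2 : (a2.1 - a1.1, a2.2 - a1.2) ≠ ((0 : Int), (0 : Int)) := by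
      intro hc
      apply hne
      have h1 := congrArg Prod.fst hc
      have h2 := congrArg Prod.snd hc
      simp only [] at h1 h2
      exact Prod.ext (by omega) (by omega)
    rw [pv_ray_eq g (a1.1 - a2.1, a1.2 - a2.2) a1 _ (Or.inl hd1)]
    rw [pv_ray_eq g (a2.1 - a1.1, a2.2 - a1.2) a2 _ (Or.inl hd2)]
    have : (-(a1.1 - a2.1), -(a1.2 - a2.2)) = (a2.1 - a1.1, a2.2 - a1.2) := by
      simp only [Prod.mk.injEq]; constructor <;> ring
    rw [this, List.append_assoc]
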